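-- pv_equiv track=rewrite | github.com/ckw1140/coding-test | ch3. hard/097.py | solve
-- ===== SOURCE A (Python) =====
-- def solve(n):
--     fact = 1
--     last = 1
--     while n > 0:
--         while n % (fact * (last + 1)) == 0:
--             fact *= (last + 1)
--             last += 1
--
--         if n % fact == 0:
--             n -= fact
--             fact *= (last + 1)
--             last += 1
--         else:
--             break
--
--     return n == 0
-- ===== SOURCE B (Python) =====
-- def solve(n):
--     i = 2
--     while n > 0:
--         if n % i > 1:
--             return False
--         n //= i
--         i += 1
--     return n == 0
-- ===== Notes on version B (the rewrite author's own statement) =====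
-- stated objective: simpler
-- what changed: Replaces A's greedy multiply-and-subtract over growing factorials (nested while loops maintaining fact/last) with a single radix-conversion pass: read each factorial-base digit as n % i, reject digits > 1, divide and increment the base.
import Mathlib
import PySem

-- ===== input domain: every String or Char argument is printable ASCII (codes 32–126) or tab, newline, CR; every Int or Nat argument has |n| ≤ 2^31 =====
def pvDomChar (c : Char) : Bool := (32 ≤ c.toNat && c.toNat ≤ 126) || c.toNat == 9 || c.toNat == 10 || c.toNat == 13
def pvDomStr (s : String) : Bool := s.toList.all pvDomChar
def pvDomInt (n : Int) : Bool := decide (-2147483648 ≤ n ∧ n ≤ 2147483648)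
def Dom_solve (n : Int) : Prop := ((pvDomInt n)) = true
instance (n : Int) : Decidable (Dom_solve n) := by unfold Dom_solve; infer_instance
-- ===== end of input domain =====

-- B replaces A's greedy factorial subtraction with a factorial-base digit scan (objective: simpler).

-- ===== PORT A =====
-- inner `while n % (fact * (last + 1)) == 0:` loop; fuel is only a totality guard (none is never reached, see proofs)
def solveInner : Nat → Int → Int → Int → Option (Int × Int)
  | 0, _, _, _ => none
  | f + 1, n, fact, last =>
    if PySem.Int.mod n (fact * (last + 1)) = 0 then
      solveInner f n (fact * (last + 1)) (last + 1)
    else some (fact, last)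

-- outer `while n > 0:` loop; fuel is only a totality guard (none is never reached, see proofs)
def solveLoop : Nat → Int → Int → Int → Option Bool
  | 0, _, _, _ => none
  | f + 1, n, fact, last =>
    if n > 0 then
      (solveInner (f + 1) n fact last).bind (fun fl =>
        if PySem.Int.mod n fl.1 = 0 then
          solveLoop f (n - fl.1) (fl.1 * (fl.2 + 1)) (fl.2 + 1)
        else some (decide (n = 0)))
    else some (decide (n = 0))

def solve (n : Int) : Bool := (solveLoop (n.toNat + 3) n 1 1).getD false

-- ===== PORT B =====
-- `while n > 0:` digit loop; fuel is only a totality guard (none is never reached, see proofs)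
def solveAltLoop : Nat → Int → Int → Option Bool
  | 0, _, _ => none
  | f + 1, n, i =>
    if n > 0 then
      if PySem.Int.mod n i > 1 then some false
      else solveAltLoop f (PySem.Int.floordiv n i) (i + 1)
    else some (decide (n = 0))

def solve_alt (n : Int) : Bool := (solveAltLoop (n.toNat + 1) n 2).getD false

-- ===== PRECONDITION & SPEC =====
def Spec_solve (n : Int) (out : Bool) : Prop := out = solve_alt n
instance (n : Int) (out : Bool) : Decidable (Spec_solve n out) := by unfold Spec_solve; infer_instance

-- ===== CLAIM (what is proved, stated in full; the proofs are below) =====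
def Claim_equal_solve : Prop := ∀ (n : Int), Dom_solve n → Spec_solve n (solve n)

-- ===== LEMMAS AND PROOFS =====

-- casted factorial, the value A's `fact` variable holds when `last = L`
def factI (L : Nat) : Int := (Nat.factorial L : Int)

lemma factI_pos (L : Nat) : 0 < factI L := by
  simpa [factI] using Int.natCast_pos.mpr (Nat.factorial_pos L)

lemma factI_succ (L : Nat) : factI (L + 1) = factI L * ((L : Int) + 1) := by
  simp [factI, Nat.factorial_succ]; ring

lemma inner_mono {f : Nat} {n a b : Int} {r : Int × Int}
    (h : solveInner f n a b = some r) : solveInner (f + 1) n a b = some r := by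
  induction f generalizing a b with
  | zero => simp [solveInner] at h
  | succ f ih =>
    rw [solveInner] at h ⊢
    split_ifs at h ⊢ with hc
    · exact ih h
    · exact h

lemma dvd_shift {L : Nat} {m : Int} :
    (factI L * ((L : Int) + 1) ∣ factI L * m) ↔ (((L : Int) + 1) ∣ m) :=
  mul_dvd_mul_iff_left (factI_pos L).ne'

lemma toNat_div_lt {m : Int} (hm : 0 < m) {k : Int} (hk : 1 < k) :
    (m / k).toNat < m.toNat := by
  have h1 : m / k < m := by rw [Int.ediv_lt_iff_lt_mul (by omega)]; nlinarith
  have h2 : 0 ≤ m / k := Int.ediv_nonneg hm.le (by omega)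
  omega

lemma toNat_mul_lt {m k : Int} (hm : 0 < m) (hk : 1 < k) : m.toNat < (k * m).toNat := by
  have h1 : m < k * m := by nlinarith
  omega

lemma inner_some {f L : Nat} {m : Int} (hL : 1 ≤ L) (hm : 0 < m)
    (hf : m.toNat ≤ f) :
    ∃ r, solveInner f (factI L * m) (factI L) (L : Int) = some r := by
  induction f generalizing L m with
  | zero => omega
  | succ f ih =>
    rw [solveInner]
    simp only [PySem.Int.mod_eq_zero_iff_dvd, dvd_shift]
    split_ifs with hc
    · obtain ⟨m', rfl⟩ := hc
      have hL1 : (1 : Int) < (L : Int) + 1 := by exact_mod_cast Nat.lt_succ_of_le hL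
      have hm' : 0 < m' := by nlinarith
      have hlt : m'.toNat ≤ f := by
        have := toNat_mul_lt hm' hL1
        omega
      have := ih (L := L + 1) (m := m') (by omega) hm' hlt
      rw [factI_succ] at this
      simpa [mul_assoc, Nat.cast_add, Nat.cast_one] using this
    · exact ⟨_, rfl⟩

-- when the current factorial-base digit is 0 (i.e. (L+1) | m), A's inner loop advances one
-- step, landing in the same computation as an outer-loop head at (fact, last) = ((L+1)!, L+1)
lemma step0 {g L : Nat} {m : Int} (hL : 1 ≤ L) (hm : 0 < m) (hdvd : ((L : Int) + 1) ∣ m)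
    (hg : m.toNat ≤ g) :
    solveLoop (g + 1) (factI L * m) (factI L) (L : Int)
      = solveLoop (g + 1) (factI L * m) (factI (L + 1)) ((L + 1 : Nat) : Int) := by
  have hn : 0 < factI L * m := mul_pos (factI_pos L) hm
  have hcast : ((L + 1 : Nat) : Int) = (L : Int) + 1 := by push_cast; ring
  have hmm : ((L : Int) + 1) * (m / ((L : Int) + 1)) = m := Int.mul_ediv_cancel' hdvd
  have hLpos : (0 : Int) < (L : Int) + 1 := by positivity
  have hm' : 0 < m / ((L : Int) + 1) := by nlinarith [hmm, hLpos, hm]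
  have hlt : (m / ((L : Int) + 1)).toNat < m.toNat :=
    toNat_div_lt hm (by exact_mod_cast Nat.lt_succ_of_le hL)
  obtain ⟨r, hr⟩ := inner_some (f := g) (L := L + 1) (m := m / ((L : Int) + 1))
    (by omega) hm' (by omega)
  have hneq : factI (L + 1) * (m / ((L : Int) + 1)) = factI L * m := by
    rw [factI_succ, mul_assoc, hmm]
  have hr' : solveInner g (factI L * m) (factI L * ((L : Int) + 1)) ((L : Int) + 1)
      = some r := by rw [← hneq, ← factI_succ, ← hcast]; exact hr
  have hinnerL : solveInner (g + 1) (factI L * m) (factI L) (L : Int) = some r := by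
    rw [solveInner, if_pos (by rw [PySem.Int.mod_eq_zero_iff_dvd, dvd_shift]; exact hdvd)]
    exact hr'
  have hinnerR : solveInner (g + 1) (factI L * m) (factI (L + 1)) ((L + 1 : Nat) : Int)
      = some r := by
    have h2 := inner_mono hr'
    rw [← factI_succ, ← hcast] at h2
    exact h2
  rw [solveLoop, solveLoop, if_pos hn, if_pos hn, hinnerL, hinnerR]

-- main correspondence: A at an outer-loop head with n = L! * m, fact = L!, last = L
-- computes the same as B at state (m, L+1)
lemma main_eq : ∀ (fB : Nat) (m : Int) (L fA : Nat), 1 ≤ L →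
    m.toNat + 3 ≤ fA → m.toNat < fB →
    solveLoop fA (factI L * m) (factI L) (L : Int) = solveAltLoop fB m ((L : Int) + 1) := by
  intro fB
  induction fB with
  | zero => intro m L fA _ _ h; omega
  | succ fB ih =>
    intro m L fA hL hfA hfB
    have hposL1 : (0 : Int) < (L : Int) + 1 := by positivity
    have hL1 : (1 : Int) < (L : Int) + 1 := by exact_mod_cast Nat.lt_succ_of_le hL
    have hcast : ((L + 1 : Nat) : Int) = (L : Int) + 1 := by push_cast; ring
    obtain ⟨g, rfl⟩ : ∃ g, fA = g + 1 := ⟨fA - 1, by omega⟩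
    by_cases hm : 0 < m
    · have hn : 0 < factI L * m := mul_pos (factI_pos L) hm
      have hmodB : PySem.Int.mod m ((L : Int) + 1) = m % ((L : Int) + 1) :=
        PySem.Int.mod_eq_emod_of_pos hposL1
      have hfd : PySem.Int.floordiv m ((L : Int) + 1) = m / ((L : Int) + 1) :=
        PySem.Int.floordiv_eq_ediv_of_pos hposL1
      by_cases h0 : ((L : Int) + 1) ∣ m
      · -- digit 0: both sides move to (m / (L+1), L+2)
        set m' := m / ((L : Int) + 1) with hm'def
        have hmm : ((L : Int) + 1) * m' = m := Int.mul_ediv_cancel' h0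
        have hm'pos : 0 < m' := by nlinarith
        have hlt : m'.toNat < m.toNat := toNat_div_lt hm hL1
        rw [step0 hL hm h0 (by omega)]
        have hneq : factI L * m = factI (L + 1) * m' := by
          rw [factI_succ, mul_assoc, hmm]
        rw [hneq, ih m' (L + 1) (g + 1) (by omega) (by omega) (by omega)]
        rw [solveAltLoop, if_pos hm,
          if_neg (by rw [hmodB, Int.emod_eq_zero_of_dvd h0]; omega), hfd, hcast]
      · by_cases h1 : m % ((L : Int) + 1) = 1
        · -- digit 1: A subtracts L!, both sides move to (m / (L+1), L+2)
          set q := m / ((L : Int) + 1) with hqdef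
          have hq : ((L : Int) + 1) * q + m % ((L : Int) + 1) = m := Int.mul_ediv_add_emod m _
          have hlt : q.toNat < m.toNat := toNat_div_lt hm hL1
          rw [solveLoop, if_pos hn, solveInner,
            if_neg (by rw [PySem.Int.mod_eq_zero_iff_dvd, dvd_shift]; exact h0)]
          simp only [Option.bind_some]
          rw [if_pos (by rw [PySem.Int.mod_eq_zero_iff_dvd]; exact dvd_mul_right _ _)]
          have hsub : factI L * m - factI L = factI (L + 1) * q := by
            rw [factI_succ]; nlinarith [hq]
          rw [hsub, ← factI_succ, ← hcast,
            ih q (L + 1) g (by omega) (by omega) (by omega)]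
          rw [solveAltLoop, if_pos hm, if_neg (by rw [hcast, hmodB, h1]; omega), hcast, hfd]
        · -- digit ≥ 2: B rejects; A subtracts L! once and then gets stuck
          have he0 : m % ((L : Int) + 1) ≠ 0 := fun h => h0 (Int.dvd_of_emod_eq_zero h)
          have heb : 0 ≤ m % ((L : Int) + 1) := Int.emod_nonneg m (by omega)
          have helt : m % ((L : Int) + 1) < (L : Int) + 1 := Int.emod_lt_of_pos m hposL1
          have he2 : 2 ≤ m % ((L : Int) + 1) := by omega
          have hm1 : m ≠ 1 := by
            intro h; rw [h, Int.emod_eq_of_lt (by omega) (by omega)] at he2; omega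
          have hm2 : 2 ≤ m := by omega
          have hq : ((L : Int) + 1) * (m / ((L : Int) + 1)) + m % ((L : Int) + 1) = m :=
            Int.mul_ediv_add_emod m _
          have hnd : ¬ ((L : Int) + 1) ∣ (m - 1) := by
            intro hd
            have hz := Int.emod_eq_zero_of_dvd hd
            rw [show m - 1 = m % ((L : Int) + 1) - 1 + ((L : Int) + 1) * (m / ((L : Int) + 1))
                by omega,
              Int.add_mul_emod_self_left, Int.emod_eq_of_lt (by omega) (by omega)] at hz
            omega
          obtain ⟨g', rfl⟩ : ∃ g', g = g' + 1 := ⟨g - 1, by omega⟩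
          rw [solveLoop, if_pos hn, solveInner,
            if_neg (by rw [PySem.Int.mod_eq_zero_iff_dvd, dvd_shift]; exact h0)]
          simp only [Option.bind_some]
          rw [if_pos (by rw [PySem.Int.mod_eq_zero_iff_dvd]; exact dvd_mul_right _ _)]
          have hsub : factI L * m - factI L = factI L * (m - 1) := by ring
          have hn2 : 0 < factI L * (m - 1) := mul_pos (factI_pos L) (by omega)
          rw [hsub, solveLoop, if_pos hn2, solveInner]
          rw [if_neg (by
            rw [PySem.Int.mod_eq_zero_iff_dvd, mul_assoc,
              mul_dvd_mul_iff_left (factI_pos L).ne']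
            intro hd
            exact hnd ((dvd_mul_right ((L : Int) + 1) (((L : Int) + 1) + 1)).trans hd))]
          simp only [Option.bind_some]
          rw [if_neg (by rw [PySem.Int.mod_eq_zero_iff_dvd, dvd_shift]; exact hnd)]
          rw [show decide (factI L * (m - 1) = 0) = false from decide_eq_false hn2.ne']
          rw [solveAltLoop, if_pos hm, if_pos (by rw [hmodB]; omega)]
    · have hle : factI L * m ≤ 0 := by nlinarith [factI_pos L]
      rw [solveLoop, solveAltLoop, if_neg (by omega : ¬ factI L * m > 0),
        if_neg (by omega : ¬ m > 0)]
      have : factI L * m = 0 ↔ m = 0 := by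
        constructor
        · intro h
          rcases mul_eq_zero.mp h with h | h
          · exact absurd h (factI_pos L).ne'
          · exact h
        · intro h; rw [h, mul_zero]
      simp [this]

-- ===== VERDICT (by name: the statement is the Claim_ definition above) =====
theorem solve_spec : Claim_equal_solve := by
  intro n _
  unfold Spec_solve solve solve_alt
  have h := main_eq (n.toNat + 1) n 1 (n.toNat + 3) (le_refl 1) (by omega) (by omega)
  have h1 : factI 1 = 1 := rfl
  rw [h1, one_mul] at h
  norm_num at h
  rw [h]
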